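-- pv_equiv track=rewrite | github.com/MrBrantCode/unitest_baseline | mut_generate/mist_train_cf/cf_25740/solution.py | most_frequent_letter
-- ===== SOURCE A (Python) =====
-- def most_frequent_letter(s):
--     # convert the string to lower case and filter non-letter characters
--     s = ''.join(filter(str.isalpha, s)).lower()
--
--     # get the letter frequency
--     letter_frequency = {}
--     for ch in s:
--         if ch in letter_frequency:
--             letter_frequency[ch] += 1
--         else:
--             letter_frequency[ch] = 1
--
--     # find the letter with the max frequency
--     max_frequency = 0
--     max_frequency_letter = ''
--     for letter, frequency in letter_frequency.items():
--         if frequency > max_frequency: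
--             max_frequency = frequency
--             max_frequency_letter = letter
--
--     return max_frequency_letter
-- ===== SOURCE B (Python) =====
-- def most_frequent_letter(s):
--     s = ''.join(filter(str.isalpha, s)).lower()
--     best = ''
--     best_count = 0
--     seen = set()
--     for ch in s:
--         if ch not in seen:
--             seen.add(ch)
--             c = s.count(ch)
--             if c > best_count:
--                 best = ch
--                 best_count = c
--     return best
-- ===== Notes on version B (the rewrite author's own statement) =====
-- stated objective: alternative
-- what changed: Replaces the frequency dictionary plus a separate argmax scan over its items by a single pass over the cleaned string that keeps a seen-set and re-counts each new letter with s.count(ch), updating the best on strictly greater counts.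
import Mathlib
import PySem

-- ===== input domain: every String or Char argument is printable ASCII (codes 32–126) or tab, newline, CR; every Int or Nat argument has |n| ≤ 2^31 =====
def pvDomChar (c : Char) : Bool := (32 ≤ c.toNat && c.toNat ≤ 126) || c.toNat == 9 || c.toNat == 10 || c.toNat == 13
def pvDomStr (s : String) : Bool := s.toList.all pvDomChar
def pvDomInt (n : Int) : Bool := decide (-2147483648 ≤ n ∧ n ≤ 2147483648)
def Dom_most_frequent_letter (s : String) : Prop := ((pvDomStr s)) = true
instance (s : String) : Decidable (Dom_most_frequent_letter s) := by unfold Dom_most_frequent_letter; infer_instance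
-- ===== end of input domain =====

-- B replaces A's frequency dictionary + separate argmax scan over its items by a single
-- pass over the cleaned string with a `seen` set and s.count(ch); alternative decomposition.

-- ===== PORT A =====
def most_frequent_letter (s : String) : String :=
  -- s = ''.join(filter(str.isalpha, s)).lower()
  let t : List Char := PySem.Chars.lower (s.toList.filter PySem.Chars.isalpha)
  -- letter_frequency: 'if ch in d: d[ch] += 1 else: d[ch] = 1'
  let d : PySem.Dict Char Int :=
    t.foldl (fun d ch =>
      if d.contains ch then d.modify ch 0 (· + 1) else d.insert ch 1) PySem.Dict.empty
  -- 'for letter, frequency in d.items(): if frequency > max_frequency: …'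
  let r : Int × String :=
    d.items.foldl (fun st p => if p.2 > st.1 then (p.2, String.ofList [p.1]) else st) (0, "")
  r.2

-- ===== PORT B =====
def most_frequent_letter_alt (s : String) : String :=
  let t : List Char := PySem.Chars.lower (s.toList.filter PySem.Chars.isalpha)
  -- one pass: state = (seen, best, best_count)
  let r : PySem.Set Char × String × Int :=
    t.foldl (fun st ch =>
      if PySem.Set.contains st.1 ch then st
      else
        let c : Int := (t.count ch : Int)
        if c > st.2.2 then (PySem.Set.add st.1 ch, String.ofList [ch], c)
        else (PySem.Set.add st.1 ch, st.2.1, st.2.2)) (PySem.Set.empty, "", 0)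
  r.2.1

-- ===== PRECONDITION & SPEC =====
def Spec_most_frequent_letter (s : String) (out : String) : Prop := out = most_frequent_letter_alt s
instance (s : String) (out : String) : Decidable (Spec_most_frequent_letter s out) := by unfold Spec_most_frequent_letter; infer_instance

-- ===== CLAIM (what is proved, stated in full; the proofs are below) =====
def Claim_equal_most_frequent_letter : Prop := ∀ (s : String), Dom_most_frequent_letter s → Spec_most_frequent_letter s (most_frequent_letter s)

-- ===== LEMMAS AND PROOFS =====

-- A's two counting branches are both Dict.modify, so the counting loop is Counter(t)
lemma countStep_eq (d : PySem.Dict Char Int) (ch : Char) :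
    (if d.contains ch then d.modify ch 0 (· + 1) else d.insert ch 1)
      = d.modify ch 0 (· + 1) := by
  by_cases h : d.contains ch = true
  · simp [h]
  · have h0 : d.getD ch 0 = 0 := by
      simp [PySem.Dict.getD, (PySem.Dict.get?_eq_none_iff_contains d ch).2 (by simpa using h)]
    simp [h, PySem.Dict.modify, h0]

lemma countFold_eq (t : List Char) :
    t.foldl (fun d ch =>
      if d.contains ch then d.modify ch 0 (· + 1) else d.insert ch 1) PySem.Dict.empty
      = PySem.Dict.counter t := by
  simp only [countStep_eq]; rfl

-- B's seen-guarded pass over l equals A's argmax scan over the first-occurrence dedup of l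
lemma seen_fold (t : List Char) (l : List Char) (seen : PySem.Set Char) (b : String) (c : Int) :
    l.foldl (fun st ch =>
      if PySem.Set.contains st.1 ch then st
      else
        let cc : Int := (t.count ch : Int)
        if cc > st.2.2 then (PySem.Set.add st.1 ch, String.ofList [ch], cc)
        else (PySem.Set.add st.1 ch, st.2.1, st.2.2)) (seen, b, c)
      = (PySem.Set.update seen l,
         (let r := (((PySem.Set.ofList l).filter (fun y => !(PySem.Set.contains seen y))).map
                      (fun k => (k, (t.count k : Int)))).foldl
              (fun st p => if p.2 > st.1 then (p.2, String.ofList [p.1]) else st) ((c, b) : Int × String)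
          ((r.2, r.1) : String × Int))) := by
  induction l using List.reverseRecOn with
  | nil => simp [PySem.Set.update_nil]
  | append_singleton xs x ih =>
    rw [List.foldl_append, ih, List.foldl_cons, List.foldl_nil,
        PySem.Set.update_append, PySem.Set.ofList_append_singleton,
        PySem.Set.update_cons, PySem.Set.update_nil]
    by_cases hmem : x ∈ seen.update xs
    · rw [if_pos (by simp [hmem])]
      rcases (PySem.Set.mem_update seen xs x).1 hmem with hs | hx
      · by_cases hox : x ∈ PySem.Set.ofList xs
        · simp [PySem.Set.add_of_mem hox, PySem.Set.add_of_mem hmem]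
        · rw [PySem.Set.add_of_not_mem hox, PySem.Set.add_of_mem hmem]
          simp [List.filter_append, hs]
      · have hox : x ∈ PySem.Set.ofList xs := (PySem.Set.mem_ofList xs x).2 hx
        simp [PySem.Set.add_of_mem hox, PySem.Set.add_of_mem hmem]
    · have hs : x ∉ seen := fun h => hmem ((PySem.Set.mem_update seen xs x).2 (Or.inl h))
      have hx : x ∉ xs := fun h => hmem ((PySem.Set.mem_update seen xs x).2 (Or.inr h))
      have hox : x ∉ PySem.Set.ofList xs := fun h => hx ((PySem.Set.mem_ofList xs x).1 h)
      rw [if_neg (by simp [hmem]),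
          PySem.Set.add_of_not_mem hox, PySem.Set.add_of_not_mem hmem]
      simp only [List.filter_append, List.map_append, List.foldl_append,
        List.filter_cons, List.filter_nil]
      have hfs : (!PySem.Set.contains seen x) = true := by simp [hs]
      rw [if_pos hfs]
      simp only [List.map_cons, List.map_nil, List.foldl_cons, List.foldl_nil]
      set r := (((PySem.Set.ofList xs).filter (fun y => !(PySem.Set.contains seen y))).map
                      (fun k => (k, (t.count k : Int)))).foldl
              (fun st p => if p.2 > st.1 then (p.2, String.ofList [p.1]) else st) ((c, b) : Int × String) with hr
      by_cases hgt : ((t.count x : Int)) > r.1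
      · simp [hgt]
      · simp [hgt]

-- ===== VERDICT (by name: the statement is the Claim_ definition above) =====
theorem most_frequent_letter_spec : Claim_equal_most_frequent_letter := by
  intro s _
  unfold Spec_most_frequent_letter most_frequent_letter most_frequent_letter_alt
  dsimp only
  rw [countFold_eq, PySem.Dict.items_counter, seen_fold]
  simp
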